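-- pv_equiv track=rewrite | github.com/Arsen1302/Code-copy-detector | TestData/solutions/problem_1641_5.py | solution_1641_5
-- ===== SOURCE A (Python) =====
-- def solution_1641_5(s: str) -> str:
--     res = [0] * (len(s) + 1)
--     stack = []
--     cur = 1
--     for i in range(len(res)):
--         if i == len(s) or s[i] == 'D':
--             stack.append(i)
--             if i < len(s):
--                 continue
--         else:
--             res[i] = cur
--             cur += 1
--         while stack:
--             res[stack.pop()] = cur
--             cur += 1
--     return ''.join(map(str,res))
-- ===== SOURCE B (Python) =====
-- def solution_1641_5(s: str) -> str:
--     n = len(s)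
--     res = list(range(1, n + 2))
--     i = 0
--     while i < n:
--         if s[i] == 'D':
--             j = i
--             while j < n and s[j] == 'D':
--                 j += 1
--             res[i:j + 1] = res[i:j + 1][::-1]
--             i = j + 1
--         else:
--             i += 1
--     return ''.join(map(str, res))
-- ===== Notes on version B (the rewrite author's own statement) =====
-- stated objective: simpler
-- what changed: Replaces the stack of deferred indices and a mutable counter with an increasing base array 1..n+1 in which each maximal run of 'D's (plus the following slot) is reversed in place.
import Mathlib
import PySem

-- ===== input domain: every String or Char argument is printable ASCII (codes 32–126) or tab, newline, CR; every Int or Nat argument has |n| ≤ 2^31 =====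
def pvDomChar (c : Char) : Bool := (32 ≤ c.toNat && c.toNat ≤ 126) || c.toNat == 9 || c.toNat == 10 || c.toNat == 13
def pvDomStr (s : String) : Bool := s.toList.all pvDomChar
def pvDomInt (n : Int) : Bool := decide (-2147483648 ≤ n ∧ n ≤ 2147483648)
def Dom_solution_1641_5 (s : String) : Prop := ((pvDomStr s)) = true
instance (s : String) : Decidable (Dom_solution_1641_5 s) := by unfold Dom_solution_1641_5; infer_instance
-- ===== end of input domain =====

-- B replaces A's stack of deferred indices by an increasing base array with each maximal
-- D-run segment reversed in place (objective: simpler).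

-- ===== PORT A =====
-- 'while stack: res[stack.pop()] = cur; cur += 1' — stack top is the list head (push = cons)
def pvPopAll (res : List Int) (stack : List Nat) (cur : Int) : List Int × Int :=
  match stack with
  | [] => (res, cur)
  | j :: rest => pvPopAll (res.set j cur) rest (cur + 1)

-- the 'for i in range(len(res))' loop of A as structural recursion on i; cs.getD i ' ' is
-- exact for s[i] since it is only consulted when i < len(s)
def pvLoopA (cs : List Char) (res : List Int) (stack : List Nat) (cur : Int) (i : Nat) : List Int :=
  if _h : i ≤ cs.length then
    if i = cs.length ∨ cs.getD i ' ' = 'D' then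
      if i = cs.length then
        -- final iteration: push i then drain the stack, loop then ends
        pvLoopA cs (pvPopAll res (i :: stack) cur).1 [] (pvPopAll res (i :: stack) cur).2 (i + 1)
      else
        -- 'continue': keep the grown stack
        pvLoopA cs res (i :: stack) cur (i + 1)
    else
      pvLoopA cs (pvPopAll (res.set i cur) stack (cur + 1)).1 []
        (pvPopAll (res.set i cur) stack (cur + 1)).2 (i + 1)
  else res
termination_by cs.length + 1 - i

def solution_1641_5 (s : String) : String :=
  let cs := s.toList
  let res := pvLoopA cs (List.replicate (cs.length + 1) (0 : Int)) [] 1 0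
  PySem.Str.join "" (res.map PySem.Int.toStr)

-- ===== PORT B =====
-- inner 'while j < n and s[j] == "D": j += 1'
def pvRunEnd (cs : List Char) (j : Nat) : Nat :=
  if _h : j < cs.length ∧ cs.getD j ' ' = 'D' then pvRunEnd cs (j + 1) else j
termination_by cs.length - j

theorem le_pvRunEnd (cs : List Char) (j : Nat) : j ≤ pvRunEnd cs j := by
  unfold pvRunEnd
  split
  · exact Nat.le_trans (Nat.le_succ j) (le_pvRunEnd cs (j + 1))
  · exact Nat.le_refl j
termination_by cs.length - j

-- the outer while loop of B; the slice assignment res[i:j+1] = res[i:j+1][::-1] is written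
-- with take/drop, exact here since 0 ≤ i ≤ j+1 ≤ len(res)
def pvLoopB (cs : List Char) (res : List Int) (i : Nat) : List Int :=
  if _h : i < cs.length then
    if cs.getD i ' ' = 'D' then
      pvLoopB cs
        (res.take i ++ ((res.drop i).take (pvRunEnd cs i + 1 - i)).reverse
          ++ res.drop (pvRunEnd cs i + 1))
        (pvRunEnd cs i + 1)
    else pvLoopB cs res (i + 1)
  else res
termination_by cs.length - i
decreasing_by
  · have := le_pvRunEnd cs i; omega
  · omega

def solution_1641_5_alt (s : String) : String :=
  let cs := s.toList
  let res := pvLoopB cs ((List.range (cs.length + 1)).map (fun k : Nat => ((k : Int) + 1))) 0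
  PySem.Str.join "" (res.map PySem.Int.toStr)

-- ===== PRECONDITION & SPEC =====
def Spec_solution_1641_5 (s : String) (out : String) : Prop := out = solution_1641_5_alt s
instance (s : String) (out : String) : Decidable (Spec_solution_1641_5 s out) := by unfold Spec_solution_1641_5; infer_instance

-- ===== CLAIM (what is proved, stated in full; the proofs are below) =====
def Claim_equal_solution_1641_5 : Prop := ∀ (s : String), Dom_solution_1641_5 s → Spec_solution_1641_5 s (solution_1641_5 s)

-- ===== LEMMAS AND PROOFS =====

-- number of leading 'D's
def pvLeadD : List Char → Nat
  | [] => 0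
  | c :: t => if c = 'D' then pvLeadD t + 1 else 0

theorem pvLeadD_le (t : List Char) : pvLeadD t ≤ t.length := by
  induction t with
  | nil => simp [pvLeadD]
  | cons c t ih =>
    simp only [pvLeadD, List.length_cons]
    split
    · omega
    · omega

theorem pvGetD_drop (cs : List Char) (i k : Nat) :
    (cs.drop i).getD k ' ' = cs.getD (i + k) ' ' := by
  simp [List.getD_eq_getElem?_getD, List.getElem?_drop]

-- the segment of values written over positions i..i+d (reversed run i..i+d-1 plus its successor)
def pvSeg (i d : Nat) : List Int :=
  (List.range (d + 1)).map (fun k : Nat => (i : Int) + (d : Int) + 1 - (k : Int))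

-- common characterisation of both loops: the output values for positions i.. of the suffix t
def pvSpec (t : List Char) (i : Nat) : List Int :=
  let d := pvLeadD t
  pvSeg i d ++ (if h : d < t.length then pvSpec (t.drop (d + 1)) (i + d + 1) else [])
termination_by t.length
decreasing_by simp; omega

theorem pvLeadD_chars (t : List Char) : ∀ k < pvLeadD t, t.getD k ' ' = 'D' := by
  induction t with
  | nil => simp [pvLeadD]
  | cons c t ih =>
    intro k hk
    simp only [pvLeadD] at hk
    split at hk
    · cases k with
      | zero => simpa
      | succ k => simpa using ih k (by omega)
    · omega

theorem pvLeadD_stop (t : List Char) (h : pvLeadD t < t.length) : t.getD (pvLeadD t) ' ' ≠ 'D' := by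
  induction t with
  | nil => simp [pvLeadD] at h
  | cons c t ih =>
    simp only [pvLeadD] at *
    split
    · rename_i hc
      simp only [hc] at h ⊢
      simpa using ih (by simpa using h)
    · simpa

theorem pvRunEnd_eq (cs : List Char) : ∀ j ≤ cs.length, pvRunEnd cs j = j + pvLeadD (cs.drop j) := by
  intro j
  induction hm : cs.length - j generalizing j with
  | zero =>
    intro hj
    have hj' : j = cs.length := by omega
    subst hj'
    rw [pvRunEnd]
    simp [pvLeadD]
  | succ m ih =>
    intro hj
    have hjlt : j < cs.length := by omega
    have hdrop : cs.drop j = cs[j] :: cs.drop (j + 1) := List.drop_eq_getElem_cons hjlt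
    rw [pvRunEnd]
    by_cases hc : cs.getD j ' ' = 'D'
    · simp only [hjlt, hc, and_self, dite_true]
      rw [ih (j + 1) (by omega) (by omega)]
      have hcg : cs[j] = 'D' := by rwa [List.getD_eq_getElem _ _ hjlt] at hc
      rw [hdrop]
      simp [pvLeadD, hcg]
      omega
    · simp only [hjlt, hc, and_false, dite_false]
      have hcg : cs[j] ≠ 'D' := by rwa [List.getD_eq_getElem _ _ hjlt] at hc
      rw [hdrop]
      simp [pvLeadD, hcg]

-- reversed push-order stack for a run starting at i of length d
theorem pvStack_snoc (i d : Nat) :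
    (((List.range (d + 1)).map (i + ·)).reverse : List Nat)
      = ((List.range d).map ((i + 1) + ·)).reverse ++ [i] := by
  rw [List.range_succ_eq_map]
  simp only [List.map_cons, List.map_map, List.reverse_cons]
  congr 1
  apply congrArg List.reverse
  apply List.map_congr_left
  intro k _
  simp [Function.comp]
  omega

theorem pvPopAll_run (d : Nat) : ∀ (res : List Int) (i : Nat) (c : Int), i + d < res.length →
    pvPopAll res (((List.range (d + 1)).map (i + ·)).reverse) c
      = (res.take i ++ (List.range (d + 1)).map (fun k : Nat => c + (d : Int) - (k : Int)) ++ res.drop (i + d + 1), c + (d : Int) + 1) := by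
  induction d with
  | zero =>
    intro res i c h
    have hs : (((List.range (0 + 1)).map (i + ·)).reverse : List Nat) = [i] := by
      norm_num
    rw [hs]
    simp only [pvPopAll]
    rw [List.set_eq_take_append_cons_drop, if_pos (by omega : i < res.length), Prod.mk.injEq]
    refine ⟨?_, by push_cast; ring⟩
    simp
  | succ d ih =>
    intro res i c h
    have hstep : (((List.range (d + 2)).map (i + ·)).reverse : List Nat)
        = (i + (d + 1)) :: ((List.range (d + 1)).map (i + ·)).reverse := by
      rw [List.range_succ]
      simp
    rw [hstep]
    simp only [pvPopAll]
    rw [ih (res.set (i + (d + 1)) c) i (c + 1) (by simpa using by omega)]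
    have htake : (res.set (i + (d + 1)) c).take i = res.take i := by
      rw [List.take_set]
      apply List.set_eq_of_length_le
      simp only [List.length_take]
      omega
    have hdrop : (res.set (i + (d + 1)) c).drop (i + d + 1) = c :: res.drop (i + d + 2) := by
      rw [List.drop_set]
      have h1 : ¬ (i + (d + 1) < i + d + 1) := by omega
      rw [if_neg h1]
      have h2 : i + (d + 1) - (i + d + 1) = 0 := by omega
      rw [h2]
      have h3 : res.drop (i + d + 1) = res[i + d + 1]'(by omega) :: res.drop (i + d + 1 + 1) :=
        List.drop_eq_getElem_cons (by omega)
      have h4 : i + d + 1 + 1 = i + d + 2 := by omega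
      rw [h4] at h3
      rw [h3, List.set_cons_zero]
    rw [htake, hdrop, Prod.mk.injEq]
    refine ⟨?_, by push_cast; ring⟩
    have hidx : i + (d + 1) + 1 = i + d + 2 := by omega
    rw [hidx]
    have hmap : (List.range (d + 1 + 1)).map (fun k : Nat => c + (((d + 1 : Nat)) : Int) - (k : Int))
        = (List.range (d + 1)).map (fun k : Nat => c + 1 + (d : Int) - (k : Int)) ++ [c] := by
      rw [List.range_succ, List.map_append]
      refine congrArg₂ (· ++ ·) ?_ ?_
      · apply List.map_congr_left; intro k _; push_cast; ring
      · simp only [List.map_cons, List.map_nil]; norm_num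
    rw [hmap]
    simp [List.append_assoc]

-- the pushing phase of A across a run of d 'D's
theorem pvLoopA_push (d : Nat) : ∀ (cs : List Char) (res : List Int) (st : List Nat) (cur : Int) (i : Nat),
    i + d ≤ cs.length → (∀ k < d, cs.getD (i + k) ' ' = 'D') →
    pvLoopA cs res st cur i
      = pvLoopA cs res (((List.range d).map (i + ·)).reverse ++ st) cur (i + d) := by
  induction d with
  | zero => intro cs res st cur i _ _; simp
  | succ d ih =>
    intro cs res st cur i hlen hD
    have hlt : i < cs.length := by omega
    have hne : ¬ i = cs.length := by omega
    rw [pvLoopA]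
    have hD0 : cs.getD i ' ' = 'D' := by simpa using hD 0 (by omega)
    simp only [hne, hD0, or_true, if_true, dif_pos (by omega : i ≤ cs.length)]
    rw [ih cs res (i :: st) cur (i + 1) (by omega) (by intro k hk; have := hD (k + 1) (by omega); convert this using 2; omega)]
    rw [pvStack_snoc]
    simp only [List.append_assoc, List.singleton_append]
    have harith : i + 1 + d = i + (d + 1) := by omega
    rw [harith]
    simp

-- main characterisation of A's loop
theorem pvLoopA_main (m : Nat) : ∀ (cs : List Char) (res : List Int) (i : Nat),
    cs.length - i ≤ m → i ≤ cs.length → res.length = cs.length + 1 →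
    pvLoopA cs res [] ((i : Int) + 1) i = res.take i ++ pvSpec (cs.drop i) i := by
  induction m with
  | zero =>
    intro cs res i hm hi hlen
    have hieq : i = cs.length := by omega
    subst hieq
    rw [pvLoopA]
    simp only [dif_pos (Nat.le_refl _), true_or, if_true]
    simp only [pvPopAll]
    rw [pvLoopA]
    simp only [dif_neg (by omega : ¬ cs.length + 1 ≤ cs.length)]
    rw [List.drop_length, pvSpec]
    rw [List.set_eq_take_append_cons_drop, if_pos (by omega : cs.length < res.length)]
    rw [List.drop_eq_nil_of_le (by omega : res.length ≤ cs.length + 1)]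
    simp [pvLeadD, pvSeg]
  | succ m ih =>
    intro cs res i hm hi hlen
    set t := cs.drop i with ht
    set d := pvLeadD t with hd
    have hdle : d ≤ t.length := pvLeadD_le t
    have htlen : t.length = cs.length - i := by simp [ht]
    have hchars : ∀ k < d, cs.getD (i + k) ' ' = 'D' := by
      intro k hk
      have := pvLeadD_chars t k hk
      rw [ht, pvGetD_drop] at this
      exact this
    -- push phase
    rw [pvLoopA_push d cs res [] ((i : Int) + 1) i (by omega) hchars]
    simp only [List.append_nil]
    by_cases hend : i + d = cs.length
    · -- trailing run: boundary index is len(s); push it and drain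
      rw [pvLoopA]
      rw [dif_pos (by omega : i + d ≤ cs.length), if_pos (Or.inl hend), if_pos hend]
      have hstack : ((i + d) :: ((List.range d).map (i + ·)).reverse : List Nat)
          = ((List.range (d + 1)).map (i + ·)).reverse := by
        rw [List.range_succ]; simp
      rw [hstack]
      rw [pvPopAll_run d res i ((i : Int) + 1) (by omega)]
      rw [pvLoopA]
      rw [dif_neg (by omega : ¬ (i + d + 1 ≤ cs.length))]
      rw [pvSpec]
      have hdeq : ¬ d < t.length := by omega
      rw [← hd, dif_neg hdeq, List.append_nil]
      have hdropnil : res.drop (i + d + 1) = [] := List.drop_eq_nil_of_le (by omega)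
      rw [hdropnil, List.append_nil, pvSeg]
      dsimp only
      congr 1
      apply List.map_congr_left
      intro k _
      push_cast
      ring
    · -- run followed by a non-'D' char at i+d
      have hlt : i + d < cs.length := by omega
      have hne : ¬ (i + d = cs.length) := hend
      have hstop : cs.getD (i + d) ' ' ≠ 'D' := by
        have := pvLeadD_stop t (by omega)
        rwa [ht, pvGetD_drop] at this
      rw [pvLoopA]
      rw [dif_pos (by omega : i + d ≤ cs.length), if_neg (not_or.mpr ⟨hne, hstop⟩)]
      -- one popAll step applied backwards: popAll res ((i+d)::S) c = popAll (res.set (i+d) c) S (c+1)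
      have hstack : ((i + d) :: ((List.range d).map (i + ·)).reverse : List Nat)
          = ((List.range (d + 1)).map (i + ·)).reverse := by
        rw [List.range_succ]; simp
      have hfold : pvPopAll (res.set (i + d) ((i : Int) + 1)) (((List.range d).map (i + ·)).reverse) ((i : Int) + 1 + 1)
          = pvPopAll res (((List.range (d + 1)).map (i + ·)).reverse) ((i : Int) + 1) := by
        rw [← hstack]; rfl
      rw [hfold, pvPopAll_run d res i ((i : Int) + 1) (by omega)]
      set res2 : List Int :=
        res.take i ++ (List.range (d + 1)).map (fun k : Nat => (i : Int) + 1 + (d : Int) - (k : Int)) ++ res.drop (i + d + 1) with hres2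
      have hres2len : res2.length = cs.length + 1 := by
        rw [hres2]
        simp only [List.length_append, List.length_take, List.length_map, List.length_range, List.length_drop, hlen]
        omega
      have hcur : (i : Int) + 1 + (d : Int) + 1 = ((i + d + 1 : Nat) : Int) + 1 := by push_cast; ring
      rw [hcur]
      rw [ih cs res2 (i + d + 1) (by omega) (by omega) hres2len]
      have htake2 : res2.take (i + d + 1)
          = res.take i ++ (List.range (d + 1)).map (fun k : Nat => (i : Int) + 1 + (d : Int) - (k : Int)) := by
        rw [hres2, List.take_append_of_le_length (by
          simp only [List.length_append, List.length_take, List.length_map, List.length_range, List.length_drop, hlen]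
          omega)]
        apply List.take_of_length_le
        simp only [List.length_append, List.length_take, List.length_map, List.length_range, List.length_drop, hlen]
        omega
      rw [htake2]
      conv_rhs => rw [pvSpec]
      have hdlt : pvLeadD t < t.length := by omega
      simp only [← hd]
      rw [dif_pos (show d < t.length by omega), List.drop_drop]
      have harith : i + (d + 1) = i + d + 1 := by omega
      rw [harith]
      simp only [List.append_assoc]
      congr 2
      rw [pvSeg]
      apply List.map_congr_left
      intro k _
      push_cast
      ring

-- main characterisation of B's loop
theorem pvLoopB_main (m : Nat) : ∀ (cs : List Char) (res : List Int) (i : Nat),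
    cs.length - i ≤ m → i ≤ cs.length → res.length = cs.length + 1 →
    (∀ k, i ≤ k → k ≤ cs.length → res.getD k 0 = (k : Int) + 1) →
    pvLoopB cs res i = res.take i ++ pvSpec (cs.drop i) i := by
  induction m with
  | zero =>
    intro cs res i hm hi hlen hres
    have hieq : i = cs.length := by omega
    subst hieq
    rw [pvLoopB]
    simp only [dif_neg (Nat.lt_irrefl _)]
    rw [pvSpec]
    simp only [List.drop_length, pvLeadD, pvSeg]
    simp only [List.length_nil, Nat.lt_irrefl]
    have hlast : res = res.take cs.length ++ [res.getD cs.length 0] := by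
      conv_lhs => rw [← List.take_append_drop cs.length res]
      congr 1
      rw [List.drop_eq_getElem_cons (by omega : cs.length < res.length)]
      rw [List.drop_eq_nil_of_le (by omega), List.getD_eq_getElem _ _ (by omega : cs.length < res.length)]
    rw [hres cs.length (Nat.le_refl _) (Nat.le_refl _)] at hlast
    conv_lhs => rw [hlast]
    norm_num
  | succ m ih =>
    intro cs res i hm hi hlen hres
    by_cases hieq : i = cs.length
    · exact ih cs res i (by omega) hi hlen hres
    have hlt : i < cs.length := by omega
    rw [pvLoopB]
    simp only [dif_pos hlt]
    set t := cs.drop i with ht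
    set d := pvLeadD t with hd
    have hdle : d ≤ t.length := pvLeadD_le t
    have htlen : t.length = cs.length - i := by simp [ht]
    by_cases hc : cs.getD i ' ' = 'D'
    · -- a D-run starts at i
      simp only [hc, if_true]
      have hj : pvRunEnd cs i = i + d := by
        rw [pvRunEnd_eq cs i (by omega)]
      have hd1 : 1 ≤ d := by
        by_contra h
        have hd0 : d = 0 := by omega
        have := pvLeadD_stop t (by omega)
        rw [← hd, hd0, ht, pvGetD_drop] at this
        simp at this
        exact this (by simpa using hc)
      rw [hj]
      have hseg : ((res.drop i).take (i + d + 1 - i)).reverse = pvSeg i d := by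
        have htk : (res.drop i).take (i + d + 1 - i)
            = (List.range (d + 1)).map (fun k : Nat => ((i + k : Nat) : Int) + 1) := by
          have : i + d + 1 - i = d + 1 := by omega
          rw [this]
          apply List.ext_getElem
          · simp [hlen]; omega
          · intro k h1 h2
            simp only [List.getElem_take, List.getElem_drop, List.getElem_map, List.getElem_range]
            have hk : k < d + 1 := by simpa using h2
            have hkl : i + k < res.length := by omega
            have := hres (i + k) (by omega) (by omega)
            rw [List.getD_eq_getElem _ _ hkl] at this
            exact this
        rw [htk]
        rw [pvSeg]
        apply List.ext_getElem
        · simp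
        · intro k h1 h2
          simp only [List.getElem_reverse, List.getElem_map, List.getElem_range, List.length_map,
            List.length_range]
          push_cast
          have hk : k < d + 1 := by simpa using h2
          omega
      rw [hseg]
      set res2 : List Int := res.take i ++ pvSeg i d ++ res.drop (i + d + 1) with hres2
      have hseglen : (pvSeg i d).length = d + 1 := by simp [pvSeg]
      by_cases hend : i + d = cs.length
      · -- trailing run: loop exits with i = len+1
        rw [pvLoopB]
        simp only [dif_neg (by omega : ¬ i + d + 1 < cs.length)]
        rw [pvSpec]
        simp only [← hd]
        rw [dif_neg (show ¬ d < t.length by omega), List.append_nil]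
        rw [hres2]
        have hnil : res.drop (i + d + 1) = [] := List.drop_eq_nil_of_le (by omega)
        rw [hnil, List.append_nil]
      · have hlt2 : i + d < cs.length := by omega
        have hres2len : res2.length = cs.length + 1 := by
          rw [hres2]
          simp only [List.length_append, List.length_take, List.length_drop, hseglen, hlen]
          omega
        have hres2tail : ∀ k, i + d + 1 ≤ k → k ≤ cs.length → res2.getD k 0 = (k : Int) + 1 := by
          intro k hk1 hk2
          have hpre : (res.take i ++ pvSeg i d).length = i + d + 1 := by
            simp [hseglen, hlen]; omega
          rw [hres2, List.append_assoc, ← List.append_assoc]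
          rw [List.getD_eq_getElem?_getD, List.getElem?_append_right (by omega), hpre]
          rw [List.getElem?_drop]
          have : i + d + 1 + (k - (i + d + 1)) = k := by omega
          rw [this, ← List.getD_eq_getElem?_getD]
          exact hres k (by omega) hk2
        rw [ih cs res2 (i + d + 1) (by omega) (by omega) hres2len hres2tail]
        have htake2 : res2.take (i + d + 1) = res.take i ++ pvSeg i d := by
          rw [hres2, List.take_append_of_le_length (by
            simp only [List.length_append, List.length_take, hseglen, hlen]
            omega)]
          apply List.take_of_length_le
          simp only [List.length_append, List.length_take, hseglen, hlen]
          omega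
        rw [htake2]
        conv_rhs => rw [pvSpec]
        have hdlt : pvLeadD t < t.length := by omega
        simp only [← hd]
        rw [dif_pos (show d < t.length by omega), List.drop_drop]
        have harith : i + (d + 1) = i + d + 1 := by omega
        rw [harith, List.append_assoc]
    · -- plain position: d = 0, move one step right
      simp only [hc, if_false]
      have hd0 : d = 0 := by
        rw [hd, ht]
        rw [List.drop_eq_getElem_cons hlt]
        have : cs[i] ≠ 'D' := by rwa [List.getD_eq_getElem _ _ hlt] at hc
        simp [pvLeadD, this]
      rw [ih cs res (i + 1) (by omega) (by omega) hlen
        (by intro k hk1 hk2; exact hres k (by omega) hk2)]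
      conv_rhs => rw [pvSpec]
      have hdlt : pvLeadD t < t.length := by omega
      simp only [← hd, hd0, dif_pos (by omega : (0:Nat) < t.length)]
      have e1 : i + (0 + 1) = i + 1 := by omega
      have e2 : i + 0 + 1 = i + 1 := by omega
      rw [e1, e2]
      have hseg0 : pvSeg i 0 = [(i : Int) + 1] := by simp [pvSeg]
      rw [hseg0]
      have htk : res.take (i + 1) = res.take i ++ [(i : Int) + 1] := by
        rw [List.take_add_one]
        congr 1
        rw [List.getElem?_eq_getElem (by omega : i < res.length)]
        have := hres i (Nat.le_refl i) (by omega)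
        rw [List.getD_eq_getElem _ _ (by omega : i < res.length)] at this
        simp [this]
      have e3 : List.drop (0 + 1) t = List.drop (i + 1) cs := by
        rw [ht, List.drop_drop, e1]
      rw [e3, htk, List.append_assoc]

-- ===== VERDICT (by name: the statement is the Claim_ definition above) =====
theorem solution_1641_5_spec : Claim_equal_solution_1641_5 := by
  intro s _hdom
  unfold Spec_solution_1641_5 solution_1641_5 solution_1641_5_alt
  simp only []
  congr 1
  have hA := pvLoopA_main (s.toList.length) s.toList (List.replicate (s.toList.length + 1) (0 : Int)) 0
    (by omega) (by omega) (by simp)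
  have hB := pvLoopB_main (s.toList.length) s.toList
    ((List.range (s.toList.length + 1)).map (fun k : Nat => ((k : Int) + 1))) 0
    (by omega) (by omega) (by simp)
    (by
      intro k hk1 hk2
      have hk : k < s.toList.length + 1 := by omega
      have hk' : k < s.length + 1 := by simpa using hk
      simp [List.getD_eq_getElem?_getD, List.getElem?_range, hk'])
  simp only [Nat.cast_zero, zero_add, List.drop_zero, List.take_zero, List.nil_append] at hA hB
  rw [hA, hB]
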